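-- pv_equiv track=rewrite | github.com/guitargnarr/projectlavos-monorepo | generate_catalog.py | get_primary_category
-- ===== SOURCE A (Python) =====
-- from typing import Dict, List, Set
--
-- def get_primary_category(techniques: Set[str]) -> str:
--     """Get the primary category for a file based on its techniques."""
--     # Priority order for primary categorization
--     priority = [
--         "sweep", "tapping", "legato", "alternate",
--         "economy", "arpeggio", "pentatonic", "scale",
--         "chord", "lick", "etude", "solo", "exercise", "pattern"
--     ]
--
--     for tech in priority:
--         if tech in techniques:
--             return tech
--
--     return "exercise"  # fallback
-- ===== SOURCE B (Python) =====
-- def get_primary_category(techniques):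
--     """Get the primary category for a file based on its techniques."""
--     priority = [
--         "sweep", "tapping", "legato", "alternate",
--         "economy", "arpeggio", "pentatonic", "scale",
--         "chord", "lick", "etude", "solo", "exercise", "pattern"
--     ]
--     rank = {tech: i for i, tech in enumerate(priority)}
--     collected = [rank[t] for t in techniques if t in rank]
--     if collected:
--         return priority[min(collected)]
--     return "exercise"
-- ===== Notes on version B (the rewrite author's own statement) =====
-- stated objective: alternative
-- what changed: Instead of scanning the fixed priority list and testing membership in the input set, B builds a rank table once, scans the input set collecting ranks of known techniques, and returns the priority entry at the minimum collected rank.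
import Mathlib
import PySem

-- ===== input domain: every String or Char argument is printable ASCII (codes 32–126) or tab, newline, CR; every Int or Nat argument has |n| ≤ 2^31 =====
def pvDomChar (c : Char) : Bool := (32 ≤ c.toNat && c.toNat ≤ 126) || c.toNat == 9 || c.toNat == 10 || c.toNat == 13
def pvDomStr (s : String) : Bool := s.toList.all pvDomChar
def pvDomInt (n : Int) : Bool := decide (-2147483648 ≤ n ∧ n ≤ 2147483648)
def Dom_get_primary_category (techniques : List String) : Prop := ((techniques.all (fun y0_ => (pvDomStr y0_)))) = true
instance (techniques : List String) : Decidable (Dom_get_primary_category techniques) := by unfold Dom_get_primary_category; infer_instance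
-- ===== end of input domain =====

-- B replaces A's scan of the fixed priority list (membership test per entry) by a rank
-- table over the priority list, a scan of the input collecting ranks, and a minimum;
-- objective: alternative decomposition, same result.

-- ===== PORT A =====
def pvPriority : List String :=
  ["sweep", "tapping", "legato", "alternate",
   "economy", "arpeggio", "pentatonic", "scale",
   "chord", "lick", "etude", "solo", "exercise", "pattern"]

-- 'for tech in priority: if tech in techniques: return tech'
def pvFirstIn : List String → List String → String
  | [], _ => "exercise"
  | p :: ps, ts => if p ∈ ts then p else pvFirstIn ps ts

def get_primary_category (techniques : List String) : String :=
  pvFirstIn pvPriority techniques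

-- ===== PORT B =====
-- rank = {tech: i for i, tech in enumerate(priority)}
def pvRank : PySem.Dict String Int :=
  (PySem.List.enumerate pvPriority).foldl (fun d p => d.insert p.2 p.1) PySem.Dict.empty

def get_primary_category_alt (techniques : List String) : String :=
  -- collected = [rank[t] for t in techniques if t in rank]
  let collected : List Int := techniques.filterMap (fun t => pvRank.get? t)
  -- if collected: return priority[min(collected)]  else "exercise"
  match PySem.List.min? collected (fun x => x) with
  | some m => PySem.List.pyGetD pvPriority m "exercise"  -- index always in range; default only for totality
  | none => "exercise"

-- ===== PRECONDITION & SPEC =====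
def Spec_get_primary_category (techniques : List String) (out : String) : Prop := out = get_primary_category_alt techniques
instance (techniques : List String) (out : String) : Decidable (Spec_get_primary_category techniques out) := by unfold Spec_get_primary_category; infer_instance

-- ===== CLAIM (what is proved, stated in full; the proofs are below) =====
def Claim_equal_get_primary_category : Prop := ∀ (techniques : List String), Dom_get_primary_category techniques → Spec_get_primary_category techniques (get_primary_category techniques)

-- ===== LEMMAS AND PROOFS =====

-- first-index function used only by the proofs
def pvIdx : List String → String → Option Int
  | [], _ => none
  | p :: ps, t => if t = p then some 0 else (pvIdx ps t).map (· + 1)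

theorem pvIdx_nonneg : ∀ (ps : List String) (t : String) (j : Int), pvIdx ps t = some j → 0 ≤ j := by
  intro ps
  induction ps with
  | nil => intro t j h; simp [pvIdx] at h
  | cons p ps ih =>
    intro t j h
    by_cases ht : t = p
    · simp [pvIdx, ht] at h; omega
    · simp [pvIdx, ht] at h
      obtain ⟨k, hk, rfl⟩ := h
      have := ih t k hk; omega

set_option maxHeartbeats 1000000 in
theorem pvRank_get? (t : String) : pvRank.get? t = pvIdx pvPriority t := by
  have h : pvRank = PySem.Dict.mk
      [("sweep", 0), ("tapping", 1), ("legato", 2), ("alternate", 3),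
       ("economy", 4), ("arpeggio", 5), ("pentatonic", 6), ("scale", 7),
       ("chord", 8), ("lick", 9), ("etude", 10), ("solo", 11),
       ("exercise", 12), ("pattern", 13)] := by decide
  rw [h]
  by_cases h1 : t = "sweep"
  · subst h1; decide
  by_cases h2 : t = "tapping"
  · subst h2; decide
  by_cases h3 : t = "legato"
  · subst h3; decide
  by_cases h4 : t = "alternate"
  · subst h4; decide
  by_cases h5 : t = "economy"
  · subst h5; decide
  by_cases h6 : t = "arpeggio"
  · subst h6; decide
  by_cases h7 : t = "pentatonic"
  · subst h7; decide
  by_cases h8 : t = "scale"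
  · subst h8; decide
  by_cases h9 : t = "chord"
  · subst h9; decide
  by_cases h10 : t = "lick"
  · subst h10; decide
  by_cases h11 : t = "etude"
  · subst h11; decide
  by_cases h12 : t = "solo"
  · subst h12; decide
  by_cases h13 : t = "exercise"
  · subst h13; decide
  by_cases h14 : t = "pattern"
  · subst h14; decide
  have g1 : ("sweep" == t) = false := beq_eq_false_iff_ne.2 (Ne.symm h1)
  have g2 : ("tapping" == t) = false := beq_eq_false_iff_ne.2 (Ne.symm h2)
  have g3 : ("legato" == t) = false := beq_eq_false_iff_ne.2 (Ne.symm h3)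
  have g4 : ("alternate" == t) = false := beq_eq_false_iff_ne.2 (Ne.symm h4)
  have g5 : ("economy" == t) = false := beq_eq_false_iff_ne.2 (Ne.symm h5)
  have g6 : ("arpeggio" == t) = false := beq_eq_false_iff_ne.2 (Ne.symm h6)
  have g7 : ("pentatonic" == t) = false := beq_eq_false_iff_ne.2 (Ne.symm h7)
  have g8 : ("scale" == t) = false := beq_eq_false_iff_ne.2 (Ne.symm h8)
  have g9 : ("chord" == t) = false := beq_eq_false_iff_ne.2 (Ne.symm h9)
  have g10 : ("lick" == t) = false := beq_eq_false_iff_ne.2 (Ne.symm h10)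
  have g11 : ("etude" == t) = false := beq_eq_false_iff_ne.2 (Ne.symm h11)
  have g12 : ("solo" == t) = false := beq_eq_false_iff_ne.2 (Ne.symm h12)
  have g13 : ("exercise" == t) = false := beq_eq_false_iff_ne.2 (Ne.symm h13)
  have g14 : ("pattern" == t) = false := beq_eq_false_iff_ne.2 (Ne.symm h14)
  simp [pvIdx, pvPriority, PySem.Dict.get?, g1, g2, g3, g4, g5, g6, g7, g8, g9, g10, g11, g12, g13, g14, h1, h2, h3, h4, h5, h6, h7, h8, h9, h10, h11, h12, h13, h14]

theorem pv_min?_map_add_one (xs : List Int) :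
    PySem.List.min? (xs.map (· + 1)) (fun x => x) = (PySem.List.min? xs (fun x => x)).map (· + 1) := by
  rcases hx : PySem.List.min? xs (fun x => x) with _ | m
  · have : xs = [] := (PySem.List.min?_eq_none_iff _ _).1 hx
    subst this
    rw [List.map_nil]
    exact (PySem.List.min?_eq_none_iff ([] : List Int) (fun x => x)).2 rfl
  · rcases hy : PySem.List.min? (xs.map (· + 1)) (fun x => x) with _ | m'
    · have : xs.map (· + 1) = [] := (PySem.List.min?_eq_none_iff _ _).1 hy
      have : xs = [] := by simpa using this
      rw [this, (PySem.List.min?_eq_none_iff ([] : List Int) (fun x => x)).2 rfl] at hx; cases hx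
    · have hm : m ∈ xs := PySem.List.min?_mem hx
      have hm' : m' ∈ xs.map (· + 1) := PySem.List.min?_mem hy
      obtain ⟨x, hxmem, rfl⟩ := List.mem_map.1 hm'
      have h1 : m ≤ x := PySem.List.min?_isMin hx x hxmem
      have h2 : x + 1 ≤ m + 1 := PySem.List.min?_isMin hy (m + 1) (List.mem_map.2 ⟨m, hm, rfl⟩)
      simp; omega

theorem pv_min?_zero (xs : List Int) (h0 : (0 : Int) ∈ xs) (hn : ∀ x ∈ xs, 0 ≤ x) :
    PySem.List.min? xs (fun x => x) = some 0 := by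
  rcases hx : PySem.List.min? xs (fun x => x) with _ | m
  · have : xs = [] := (PySem.List.min?_eq_none_iff _ _).1 hx
    subst this; simp at h0
  · have hm : m ∈ xs := PySem.List.min?_mem hx
    have h1 : 0 ≤ m := hn m hm
    have h2 : m ≤ 0 := PySem.List.min?_isMin hx 0 h0
    have : m = 0 := le_antisymm h2 h1
    simp [this]

theorem pvGetD_cons_succ (p : String) (ps : List String) (m : Int) (d : String) (hm : 0 ≤ m) :
    PySem.List.pyGetD (p :: ps) (m + 1) d = PySem.List.pyGetD ps m d := by
  obtain ⟨k, rfl⟩ := Int.eq_ofNat_of_zero_le hm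
  have : ((k : Int) + 1) = ((k + 1 : Nat) : Int) := by push_cast; ring
  rw [this, PySem.List.pyGetD_natCast, PySem.List.pyGetD_natCast]
  simp [List.getD]

theorem pvMain (ps ts : List String) :
    pvFirstIn ps ts =
      match PySem.List.min? (ts.filterMap (pvIdx ps)) (fun x => x) with
      | some m => PySem.List.pyGetD ps m "exercise"
      | none => "exercise" := by
  induction ps generalizing ts with
  | nil =>
    have he : ts.filterMap (pvIdx []) = [] := by simp [pvIdx]
    rw [he, (PySem.List.min?_eq_none_iff ([] : List Int) (fun x => x)).2 rfl]
    rfl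
  | cons p ps ih =>
    by_cases hp : p ∈ ts
    · have h0 : (0 : Int) ∈ ts.filterMap (pvIdx (p :: ps)) := by
        exact List.mem_filterMap.2 ⟨p, hp, by simp [pvIdx]⟩
      have hn : ∀ x ∈ ts.filterMap (pvIdx (p :: ps)), (0 : Int) ≤ x := by
        intro x hx
        obtain ⟨t, _, ht⟩ := List.mem_filterMap.1 hx
        exact pvIdx_nonneg _ t x ht
      rw [pv_min?_zero _ h0 hn]
      simp [pvFirstIn, hp, PySem.List.pyGetD_zero_cons]
    · have hcong : ts.filterMap (pvIdx (p :: ps)) = (ts.filterMap (pvIdx ps)).map (· + 1) := by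
        rw [List.map_filterMap]
        apply List.filterMap_congr
        intro t ht
        have : t ≠ p := fun h => hp (h ▸ ht)
        simp [pvIdx, this]
      rw [hcong, pv_min?_map_add_one]
      rcases hx : PySem.List.min? (ts.filterMap (pvIdx ps)) (fun x => x) with _ | m
      · simp [pvFirstIn, hp, ih ts, hx]
      · have hm : m ∈ ts.filterMap (pvIdx ps) := PySem.List.min?_mem hx
        obtain ⟨t, _, ht⟩ := List.mem_filterMap.1 hm
        have hm0 : 0 ≤ m := pvIdx_nonneg _ t m ht
        simp only [pvFirstIn, if_neg hp, ih ts, hx, Option.map_some]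
        exact (pvGetD_cons_succ p ps m "exercise" hm0).symm

-- ===== VERDICT (by name: the statement is the Claim_ definition above) =====
theorem get_primary_category_spec : Claim_equal_get_primary_category := by
  intro ts _
  unfold Spec_get_primary_category get_primary_category get_primary_category_alt
  simp only [pvRank_get?]
  exact pvMain pvPriority ts
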